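-- pv_equiv track=rewrite | github.com/Saltychtao/PreAlign | src/data/bilingual_dictionary_pretrain_data_multi.py | pad_and_concatenate
-- ===== SOURCE A (Python) =====
-- def pad_and_concatenate(xs,target_length,sep_id, pad_token_idx):
--     padded_sublists = []
--
--     current_sublist = []
--
--     for x in xs:
--         if x == sep_id:
--             current_sublist = [pad_token_idx] * (target_length-len(current_sublist)) + current_sublist
--             padded_sublists.append(current_sublist)
--             current_sublist = []
--         else:
--             current_sublist.append(x)
--     if current_sublist:
--         current_sublist = [pad_token_idx] * (target_length - len(current_sublist)) + current_sublist
--         padded_sublists.append(current_sublist)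
--     concatenated_list = [item for sublist in padded_sublists for item in sublist]
--     return concatenated_list, len(padded_sublists)
-- ===== SOURCE B (Python) =====
-- def pad_and_concatenate(xs, target_length, sep_id, pad_token_idx):
--     segments = []
--     rest = xs
--     while sep_id in rest:
--         i = rest.index(sep_id)
--         segments.append(rest[:i])
--         rest = rest[i + 1:]
--     if rest:
--         segments.append(rest)
--     flat = [tok for seg in segments
--             for tok in [pad_token_idx] * (target_length - len(seg)) + seg]
--     return flat, len(segments)
-- ===== Notes on version B (the rewrite author's own statement) =====
-- stated objective: alternative
-- what changed: B extracts segments by repeatedly locating the next separator with index() and slicing (rest[:i], rest[i+1:]) and pads all segments at the end in one flattening comprehension, instead of A's per-element loop that maintains a running current_sublist accumulator and pads inline at each separator.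
import Mathlib
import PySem

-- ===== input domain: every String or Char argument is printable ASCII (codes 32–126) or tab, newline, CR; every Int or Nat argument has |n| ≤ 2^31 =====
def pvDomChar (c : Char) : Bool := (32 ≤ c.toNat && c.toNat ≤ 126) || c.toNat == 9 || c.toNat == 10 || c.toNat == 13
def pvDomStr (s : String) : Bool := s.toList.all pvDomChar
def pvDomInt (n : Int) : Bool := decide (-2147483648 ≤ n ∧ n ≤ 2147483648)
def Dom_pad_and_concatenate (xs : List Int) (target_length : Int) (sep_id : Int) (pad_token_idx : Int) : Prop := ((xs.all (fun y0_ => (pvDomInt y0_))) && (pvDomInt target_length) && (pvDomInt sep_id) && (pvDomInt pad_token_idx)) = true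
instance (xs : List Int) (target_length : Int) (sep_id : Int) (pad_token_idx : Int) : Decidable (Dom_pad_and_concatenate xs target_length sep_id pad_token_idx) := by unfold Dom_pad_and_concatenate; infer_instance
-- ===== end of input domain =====

-- B replaces A's per-element loop with a running accumulator by repeated index()-and-slice
-- segment extraction (objective: alternative decomposition, not faster).

-- ===== PORT A =====
-- literal transliteration of A: a fold over xs carrying (padded_sublists, current_sublist),
-- [pad]*(k) is PySem.List.pyRepeat [pad] k (empty for negative k, as in Python)
def pad_and_concatenate (xs : List Int) (target_length : Int) (sep_id : Int) (pad_token_idx : Int) : List Int × Int :=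
  let step := fun (st : List (List Int) × List Int) (x : Int) =>
    if x == sep_id then
      (st.1 ++ [PySem.List.pyRepeat [pad_token_idx] (target_length - (st.2.length : Int)) ++ st.2], ([] : List Int))
    else (st.1, st.2 ++ [x])
  let st := xs.foldl step ([], [])
  let padded_sublists :=
    if st.2 ≠ [] then
      st.1 ++ [PySem.List.pyRepeat [pad_token_idx] (target_length - (st.2.length : Int)) ++ st.2]
    else st.1
  (padded_sublists.flatten, (padded_sublists.length : Int))

-- ===== PORT B =====
-- B-side helper: the 'while sep_id in rest' loop of Source B (index? is none iff sep_id ∉ rest,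
-- which is Python's membership test; rest[:i] and rest[i+1:] are PySem slices)
def pvGoB (sep_id : Int) (rest : List Int) : List (List Int) :=
  match h : PySem.List.index? rest sep_id with
  | some i =>
      PySem.List.slice rest (some 0) (some (i : Int)) ::
        pvGoB sep_id (PySem.List.slice rest (some ((i : Int) + 1)) none)
  | none => if rest ≠ [] then [rest] else []
termination_by rest.length
decreasing_by
  obtain ⟨hk, -, -⟩ := PySem.List.getElem_of_index?_eq_some h
  rw [PySem.List.slice_from _ (by positivity)]
  simp only [List.length_drop]
  omega

def pad_and_concatenate_alt (xs : List Int) (target_length : Int) (sep_id : Int) (pad_token_idx : Int) : List Int × Int :=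
  let segments := pvGoB sep_id xs
  let flat := segments.flatMap
    (fun seg => PySem.List.pyRepeat [pad_token_idx] (target_length - (seg.length : Int)) ++ seg)
  (flat, (segments.length : Int))

-- ===== PRECONDITION & SPEC =====
def Spec_pad_and_concatenate (xs : List Int) (target_length : Int) (sep_id : Int) (pad_token_idx : Int) (out : List Int × Int) : Prop := out = pad_and_concatenate_alt xs target_length sep_id pad_token_idx
instance (xs : List Int) (target_length : Int) (sep_id : Int) (pad_token_idx : Int) (out : List Int × Int) : Decidable (Spec_pad_and_concatenate xs target_length sep_id pad_token_idx out) := by unfold Spec_pad_and_concatenate; infer_instance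

-- ===== CLAIM (what is proved, stated in full; the proofs are below) =====
def Claim_equal_pad_and_concatenate : Prop := ∀ (xs : List Int) (target_length : Int) (sep_id : Int) (pad_token_idx : Int), Dom_pad_and_concatenate xs target_length sep_id pad_token_idx → Spec_pad_and_concatenate xs target_length sep_id pad_token_idx (pad_and_concatenate xs target_length sep_id pad_token_idx)

-- ===== LEMMAS AND PROOFS =====

-- proof-side names for A's loop body and final flush (definitionally the lambdas in the port)
def pvStep (sep_id t p : Int) (st : List (List Int) × List Int) (x : Int) : List (List Int) × List Int :=
  if x == sep_id then
    (st.1 ++ [PySem.List.pyRepeat [p] (t - (st.2.length : Int)) ++ st.2], ([] : List Int))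
  else (st.1, st.2 ++ [x])

def pvFinish (t p : Int) (st : List (List Int) × List Int) : List (List Int) :=
  if st.2 ≠ [] then st.1 ++ [PySem.List.pyRepeat [p] (t - (st.2.length : Int)) ++ st.2] else st.1

def pvPad (t p : Int) (seg : List Int) : List Int :=
  PySem.List.pyRepeat [p] (t - (seg.length : Int)) ++ seg

-- reference: the list of (unpadded) segments A emits, given the pending current_sublist
def pvASegs (sep_id : Int) : List Int → List Int → List (List Int)
  | cur, [] => if cur ≠ [] then [cur] else []
  | cur, x :: l => if x = sep_id then cur :: pvASegs sep_id [] l else pvASegs sep_id (cur ++ [x]) l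

lemma pvFoldA (sep_id t p : Int) (l : List Int) : ∀ (acc : List (List Int)) (cur : List Int),
    pvFinish t p (l.foldl (pvStep sep_id t p) (acc, cur))
      = acc ++ (pvASegs sep_id cur l).map (pvPad t p) := by
  induction l with
  | nil =>
      intro acc cur
      simp only [List.foldl_nil, pvASegs, pvFinish]
      split <;> simp [pvPad]
  | cons x l ih =>
      intro acc cur
      rw [List.foldl_cons]
      by_cases hx : x = sep_id
      · have hs : pvStep sep_id t p (acc, cur) x = (acc ++ [pvPad t p cur], []) := by
          simp [pvStep, pvPad, hx]
        rw [hs, ih]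
        simp [pvASegs, hx]
      · have hs : pvStep sep_id t p (acc, cur) x = (acc, cur ++ [x]) := by
          simp [pvStep, hx]
        rw [hs, ih]
        simp [pvASegs, hx]

lemma pvASegs_no_sep (sep_id : Int) (l : List Int) (hl : sep_id ∉ l) :
    ∀ cur, pvASegs sep_id cur l = if cur ++ l ≠ [] then [cur ++ l] else [] := by
  induction l with
  | nil => intro cur; simp [pvASegs]
  | cons x l ih =>
      intro cur
      have hx : x ≠ sep_id := fun h => hl (h ▸ List.mem_cons_self)
      have hl' : sep_id ∉ l := fun h => hl (List.mem_cons_of_mem _ h)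
      simp only [pvASegs, if_neg hx, ih hl']
      simp

lemma pvASegs_append_sep (sep_id : Int) (a : List Int) (ha : sep_id ∉ a) (r : List Int) :
    ∀ cur, pvASegs sep_id cur (a ++ sep_id :: r) = (cur ++ a) :: pvASegs sep_id [] r := by
  induction a with
  | nil => intro cur; simp [pvASegs]
  | cons x a ih =>
      intro cur
      have hx : x ≠ sep_id := fun h => ha (h ▸ List.mem_cons_self)
      have ha' : sep_id ∉ a := fun h => ha (List.mem_cons_of_mem _ h)
      simp only [List.cons_append, pvASegs, if_neg hx, ih ha']
      simp

lemma pvGoB_eq_pvASegs (sep_id : Int) (rest : List Int) :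
    pvGoB sep_id rest = pvASegs sep_id [] rest := by
  induction hn : rest.length using Nat.strong_induction_on generalizing rest with
  | _ n ih =>
  rw [pvGoB]
  split
  · next i h =>
      obtain ⟨pre, suf, hsplit, hlen, hmem⟩ := (PySem.List.index?_eq_some_iff _ _ _).1 h
      subst hlen
      have h1 : PySem.List.slice rest (some 0) (some ((pre.length : Nat) : Int)) = pre := by
        rw [PySem.List.slice_zero_start, PySem.List.slice_to _ (by positivity)]
        subst hsplit; simp
      have h2 : PySem.List.slice rest (some ((pre.length : Int) + 1)) none = suf := by
        rw [PySem.List.slice_from _ (by positivity)]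
        have ht : (((pre.length : Int)) + 1).toNat = pre.length + 1 := by omega
        rw [ht]
        subst hsplit
        have hsplit2 : pre ++ sep_id :: suf = (pre ++ [sep_id]) ++ suf := by simp
        rw [hsplit2]
        simp
      rw [h1, h2, hsplit, pvASegs_append_sep sep_id pre hmem suf, List.nil_append]
      congr 1
      exact ih suf.length (by subst hsplit; simp at hn ⊢; omega) suf rfl
  · next h =>
      have : sep_id ∉ rest := (PySem.List.index?_eq_none_iff _ _).1 h
      rw [pvASegs_no_sep sep_id rest this []]
      simp

-- ===== VERDICT (by name: the statement is the Claim_ definition above) =====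
theorem pad_and_concatenate_spec : Claim_equal_pad_and_concatenate := by
  intro xs t sep p _
  show pad_and_concatenate xs t sep p = pad_and_concatenate_alt xs t sep p
  have hA : pad_and_concatenate xs t sep p
      = ((pvFinish t p (xs.foldl (pvStep sep t p) ([], []))).flatten,
         ((pvFinish t p (xs.foldl (pvStep sep t p) ([], []))).length : Int)) := rfl
  have hB : pad_and_concatenate_alt xs t sep p
      = (((pvGoB sep xs).flatMap (pvPad t p)), ((pvGoB sep xs).length : Int)) := rfl
  rw [hA, hB, pvGoB_eq_pvASegs, pvFoldA sep t p xs [] [], List.nil_append, List.flatMap_def]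
  simp
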